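-- pv_equiv track=rewrite | github.com/owid/etl | etl/step_browser.py | highlight_matches
-- ===== SOURCE A (Python) =====
-- from typing import Any, Callable, Dict, List, Optional, Set, Tuple
--
-- def highlight_matches(step: str, pattern: str, is_selected: bool) -> List[Tuple[str, str]]:
--     """Create styled text segments with matching terms highlighted.
--
--     Returns a list of (style, text) tuples for prompt_toolkit.
--     """
--     if not pattern:
--         style = "class:step.selected" if is_selected else "class:step"
--         return [(style, step)]
--
--     base_style = "class:step.selected" if is_selected else "class:step"
--     highlight_style = "class:step.selected.highlight" if is_selected else "class:step.highlight"
--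
--     terms = pattern.split()
--     step_lower = step.lower()
--
--     # Find all match positions
--     matches: List[Tuple[int, int]] = []  # (start, end) positions
--     for term in terms:
--         term_lower = term.lower()
--         start = 0
--         while True:
--             pos = step_lower.find(term_lower, start)
--             if pos == -1:
--                 break
--             matches.append((pos, pos + len(term)))
--             start = pos + 1
--
--     if not matches:
--         return [(base_style, step)]
--
--     # Merge overlapping matches and sort by position
--     matches.sort()
--     merged: List[Tuple[int, int]] = []
--     for start, end in matches:
--         if merged and start <= merged[-1][1]:
--             merged[-1] = (merged[-1][0], max(merged[-1][1], end))
--         else: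
--             merged.append((start, end))
--
--     # Build styled segments
--     segments: List[Tuple[str, str]] = []
--     pos = 0
--     for start, end in merged:
--         if pos < start:
--             segments.append((base_style, step[pos:start]))
--         segments.append((highlight_style, step[start:end]))
--         pos = end
--     if pos < len(step):
--         segments.append((base_style, step[pos:]))
--
--     return segments
-- ===== SOURCE B (Python) =====
-- from typing import List, Tuple
--
-- def highlight_matches(step: str, pattern: str, is_selected: bool) -> List[Tuple[str, str]]:
--     """Create styled text segments with matching terms highlighted.
--
--     Mask-based re-implementation: mark every matched position in a boolean
--     mask, then emit maximal constant runs of the mask in one pass.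
--     """
--     if not pattern:
--         style = "class:step.selected" if is_selected else "class:step"
--         return [(style, step)]
--
--     base_style = "class:step.selected" if is_selected else "class:step"
--     highlight_style = "class:step.selected.highlight" if is_selected else "class:step.highlight"
--
--     step_lower = step.lower()
--     mask = [False] * len(step)
--     for term in pattern.split():
--         term_lower = term.lower()
--         start = 0
--         while True:
--             pos = step_lower.find(term_lower, start)
--             if pos == -1:
--                 break
--             for i in range(pos, pos + len(term)):
--                 mask[i] = True
--             start = pos + 1
--
--     if True not in mask:
--         return [(base_style, step)]
--
--     segments: List[Tuple[str, str]] = []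
--     cur_flag = mask[0]
--     cur_text: List[str] = []
--     for ch, flag in zip(step, mask):
--         if flag == cur_flag:
--             cur_text.append(ch)
--         else:
--             segments.append((highlight_style if cur_flag else base_style, "".join(cur_text)))
--             cur_flag = flag
--             cur_text = [ch]
--     segments.append((highlight_style if cur_flag else base_style, "".join(cur_text)))
--     return segments
-- ===== Notes on version B (the rewrite author's own statement) =====
-- stated objective: alternative
-- what changed: Replaces A's collect-all-intervals / sort / merge-overlaps / segment-build pipeline by a boolean highlight mask over the string that is filled per match and then emitted as maximal constant runs in a single zip pass, with no interval list, no sort and no merge step.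
import Mathlib
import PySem

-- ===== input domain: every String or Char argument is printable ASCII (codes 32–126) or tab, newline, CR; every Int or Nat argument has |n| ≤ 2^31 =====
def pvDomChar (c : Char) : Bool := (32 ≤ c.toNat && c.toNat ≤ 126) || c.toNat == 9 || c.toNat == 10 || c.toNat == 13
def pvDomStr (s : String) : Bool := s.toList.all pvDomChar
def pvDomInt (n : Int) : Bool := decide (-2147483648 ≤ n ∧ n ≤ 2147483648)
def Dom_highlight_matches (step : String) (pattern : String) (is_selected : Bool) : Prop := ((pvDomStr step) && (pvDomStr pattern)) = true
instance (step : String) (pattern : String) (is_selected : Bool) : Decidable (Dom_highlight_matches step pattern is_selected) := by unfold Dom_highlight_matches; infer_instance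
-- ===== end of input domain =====

-- B replaces A's collect/sort/merge interval pipeline by a boolean highlight mask over the
-- string emitted as maximal constant runs in one pass (objective: alternative; same result).

-- ===== PORT A =====
-- the `while True: pos = step_lower.find(term_lower, start)` loop that BOTH Pythons contain
-- verbatim; fuel only makes the while-loop total (sl.length + 2 always suffices: start strictly
-- increases and a start past the end makes find return -1); find results are ≥ 0 whenever ≠ -1,
-- so `.toNat` is exact here.
def hmOcc (sl t : List Char) : Nat → Nat → List Nat
  | _, 0 => []
  | start, fuel+1 =>
    let pos := PySem.Chars.findFrom sl t (start : Int) none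
    if pos = -1 then []
    else pos.toNat :: hmOcc sl t (pos.toNat + 1) fuel

-- A's match-collection loop: for each term, append (pos, pos + len(term)) for every hit
def hmMatches (sl : List Char) (terms : List (List Char)) : List (Nat × Nat) :=
  terms.foldl
    (fun m term =>
      m ++ (hmOcc sl (PySem.Chars.lower term) 0 (sl.length + 2)).map
        (fun p => (p, p + term.length)))
    ([] : List (Nat × Nat))

-- A's merge loop; the accumulator holds `merged` in REVERSED order so that Python's
-- `merged[-1]` is the head.
def hmMerge : List (Nat × Nat) → List (Nat × Nat) → List (Nat × Nat)
  | accRev, [] => accRev.reverse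
  | accRev, (s, e) :: rest =>
    match accRev with
    | (ls, le) :: tl =>
      if s ≤ le then hmMerge ((ls, max le e) :: tl) rest
      else hmMerge ((s, e) :: (ls, le) :: tl) rest
    | [] => hmMerge [(s, e)] rest

-- A's segment-building loop; the trailing `if pos < len(step)` is the base case.
def hmBuild (cs : List Char) (base hi : String) : Nat → List (Nat × Nat) → List (String × String)
  | pos, [] =>
    if pos < cs.length then [(base, String.ofList (PySem.Chars.slice cs (some (pos : Int)) none))]
    else []
  | pos, (s, e) :: rest =>
    (if pos < s then [(base, String.ofList (PySem.Chars.slice cs (some (pos : Int)) (some (s : Int))))] else [])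
      ++ ((hi, String.ofList (PySem.Chars.slice cs (some (s : Int)) (some (e : Int)))) :: hmBuild cs base hi e rest)

def highlight_matches (step : String) (pattern : String) (is_selected : Bool) : List (String × String) :=
  if pattern = "" then
    let style := if is_selected then "class:step.selected" else "class:step"
    [(style, step)]
  else
    let base_style := if is_selected then "class:step.selected" else "class:step"
    let highlight_style := if is_selected then "class:step.selected.highlight" else "class:step.highlight"
    let terms := PySem.Chars.split₀ pattern.toList
    let step_lower := PySem.Chars.lower step.toList
    let matchesL := hmMatches step_lower terms
    if matchesL = [] then [(base_style, step)]
    else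
      let merged := hmMerge [] (PySem.List.sorted2 matchesL Prod.fst Prod.snd)
      hmBuild step.toList base_style highlight_style 0 merged

-- ===== PORT B =====
-- `for i in range(pos, pos + len(term)): mask[i] = True` (every index is in range in Python;
-- List.set is exact there and a no-op out of range).
def hmSetRange (mask : List Bool) (p len : Nat) : List Bool :=
  (List.range' p len).foldl (fun mk i => mk.set i true) mask

-- B's mask-filling loop over the terms of the pattern (same find loop hmOcc as A's Python)
def hmMask (sl : List Char) (terms : List (List Char)) (n : Nat) : List Bool :=
  terms.foldl
    (fun mk term =>
      (hmOcc sl (PySem.Chars.lower term) 0 (sl.length + 2)).foldl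
        (fun mk2 p => hmSetRange mk2 p term.length) mk)
    (List.replicate n false)

-- B's run-grouping loop over zip(step, mask) with the (cur_flag, cur_text) accumulator;
-- `"".join(cur_text)` is String.ofList.
def hmGroup (base hi : String) : Bool → List Char → List (Char × Bool) → List (String × String)
  | cur, txt, [] => [((if cur then hi else base), String.ofList txt)]
  | cur, txt, (ch, f) :: rest =>
    if f = cur then hmGroup base hi cur (txt ++ [ch]) rest
    else ((if cur then hi else base), String.ofList txt) :: hmGroup base hi f [ch] rest

def highlight_matches_alt (step : String) (pattern : String) (is_selected : Bool) : List (String × String) :=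
  if pattern = "" then
    let style := if is_selected then "class:step.selected" else "class:step"
    [(style, step)]
  else
    let base_style := if is_selected then "class:step.selected" else "class:step"
    let highlight_style := if is_selected then "class:step.selected.highlight" else "class:step.highlight"
    let step_lower := PySem.Chars.lower step.toList
    let mask := hmMask step_lower (PySem.Chars.split₀ pattern.toList) step.toList.length
    if !mask.contains true then [(base_style, step)]
    else
      -- mask[0]: mask is nonempty on this branch, headD's default is never read
      hmGroup base_style highlight_style (mask.headD false) [] (step.toList.zip mask)

-- ===== PRECONDITION & SPEC =====
def Spec_highlight_matches (step : String) (pattern : String) (is_selected : Bool) (out : List (String × String)) : Prop := out = highlight_matches_alt step pattern is_selected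
instance (step : String) (pattern : String) (is_selected : Bool) (out : List (String × String)) : Decidable (Spec_highlight_matches step pattern is_selected out) := by unfold Spec_highlight_matches; infer_instance

-- ===== CLAIM (what is proved, stated in full; the proofs are below) =====
def Claim_equal_highlight_matches : Prop := ∀ (step : String) (pattern : String) (is_selected : Bool), Dom_highlight_matches step pattern is_selected → Spec_highlight_matches step pattern is_selected (highlight_matches step pattern is_selected)

-- ===== LEMMAS AND PROOFS =====

-- proof-only helpers ------------------------------------------------------

-- `covB M i` : position i lies inside some interval of M
def covB (M : List (Nat × Nat)) (i : Nat) : Bool := M.any (fun p => decide (p.1 ≤ i) && decide (i < p.2))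

-- characters of a list tagged with the mask value of their absolute position
def tagged (cov : Nat → Bool) : Nat → List Char → List (Char × Bool)
  | _, [] => []
  | i, c :: rest => (c, cov i) :: tagged cov (i+1) rest

-- maximal constant runs of the flag
def chunks : List (Char × Bool) → List (Bool × List Char)
  | [] => []
  | (c, b) :: rest =>
    match chunks rest with
    | (b', run) :: more => if b' = b then (b, c :: run) :: more else (b, [c]) :: (b', run) :: more
    | [] => [(b, [c])]

def render (base hi : String) (l : List (Bool × List Char)) : List (String × String) :=
  l.map (fun r => ((if r.1 then hi else base), String.ofList r.2))

theorem covB_nil (i : Nat) : covB [] i = false := rfl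

theorem covB_cons (p : Nat × Nat) (M : List (Nat × Nat)) (i : Nat) :
    covB (p :: M) i = ((decide (p.1 ≤ i) && decide (i < p.2)) || covB M i) := by
  simp [covB]

theorem covB_append (M N : List (Nat × Nat)) (i : Nat) :
    covB (M ++ N) i = (covB M i || covB N i) := by
  simp [covB]

theorem covB_reverse (M : List (Nat × Nat)) (i : Nat) : covB M.reverse i = covB M i := by
  simp [covB]

theorem covB_perm {M N : List (Nat × Nat)} (h : M.Perm N) (i : Nat) : covB M i = covB N i :=
  List.Perm.any_eq h

theorem hmOcc_sound (sl t : List Char) (ht : t ≠ []) :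
    ∀ (fuel start : Nat), start ≤ sl.length →
      ∀ p ∈ hmOcc sl t start fuel, t <+: sl.drop p := by
  intro fuel
  induction fuel with
  | zero => intro start _ p hp; simp [hmOcc] at hp
  | succ fuel ih =>
    intro start hstart p hp
    simp only [hmOcc] at hp
    by_cases hneg : PySem.Chars.findFrom sl t (start : Int) none = -1
    · simp [hneg] at hp
    · simp only [hneg, if_false] at hp
      obtain ⟨hle, hpre, -⟩ := PySem.Chars.findFrom_natCast_spec sl t start hstart hneg
      have hlt : (PySem.Chars.findFrom sl t (start : Int) none).toNat < sl.length := by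
        by_contra hge
        push Not at hge
        have : sl.drop (PySem.Chars.findFrom sl t (start : Int) none).toNat = [] :=
          List.drop_eq_nil_of_le hge
        rw [this] at hpre
        exact ht (List.prefix_nil.mp hpre)
      rcases List.mem_cons.mp hp with rfl | hp'
      · exact hpre
      · exact ih _ (by omega) p hp'

theorem hmOcc_bound (sl t : List Char) (ht : t ≠ []) (fuel : Nat)
    (p : Nat) (hp : p ∈ hmOcc sl t 0 fuel) : p + t.length ≤ sl.length := by
  have hpre := hmOcc_sound sl t ht fuel 0 (by omega) p hp
  have h1 : t.length ≤ (sl.drop p).length := hpre.length_le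
  have h2 : p ≤ sl.length := by
    by_contra hgt
    rw [List.drop_eq_nil_of_le (by omega)] at hpre
    exact ht (List.prefix_nil.mp hpre)
  rw [List.length_drop] at h1
  omega

theorem split₀_go_ne_nil : ∀ (rest cur : List Char) (acc : List (List Char)),
    (∀ v ∈ acc, v ≠ []) → ∀ w ∈ PySem.Chars.split₀.go rest cur acc, w ≠ [] := by
  intro rest
  induction rest with
  | nil =>
    intro cur acc hacc w hw
    by_cases hc : cur.isEmpty
    · simp [PySem.Chars.split₀.go, hc] at hw
      exact hacc w (List.mem_reverse.mp (by simpa using hw))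
    · simp [PySem.Chars.split₀.go, hc] at hw
      rcases hw with hw | rfl
      · exact hacc w hw
      · simp [List.isEmpty_iff] at hc
        simpa using hc
  | cons c rest ih =>
    intro cur acc hacc w hw
    by_cases hs : PySem.Chars.isspace c
    · by_cases hc : cur.isEmpty
      · simp only [PySem.Chars.split₀.go, hs, hc, if_true] at hw
        exact ih [] acc hacc w hw
      · simp only [PySem.Chars.split₀.go, hs, hc, if_true, if_false] at hw
        refine ih [] (cur.reverse :: acc) ?_ w hw
        intro v hv
        rcases List.mem_cons.mp hv with rfl | hv'
        · simp [List.isEmpty_iff] at hc; simpa using hc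
        · exact hacc v hv'
    · simp only [PySem.Chars.split₀.go, hs, if_false] at hw
      exact ih (c :: cur) acc hacc w hw

theorem split₀_ne_nil (l : List Char) : ∀ w ∈ PySem.Chars.split₀ l, w ≠ [] := by
  intro w hw
  exact split₀_go_ne_nil l [] [] (by simp) w hw


theorem setRange_getElem? (l : Nat) : ∀ (p : Nat) (mask : List Bool) (i : Nat),
    ((List.range' p l).foldl (fun mk j => mk.set j true) mask)[i]? =
      if p ≤ i ∧ i < p + l then (if i < mask.length then some true else none) else mask[i]? := by
  induction l with
  | zero =>
    intro p mask i
    simp only [List.range', List.foldl_nil]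
    have : ¬(p ≤ i ∧ i < p + 0) := by omega
    simp [this]
  | succ l ih =>
    intro p mask i
    rw [List.range'_succ, List.foldl_cons, ih]
    by_cases h1 : p + 1 ≤ i ∧ i < p + 1 + l
    · simp only [h1, and_true, true_and, if_true, List.length_set]
      have : p ≤ i ∧ i < p + (l+1) := by omega
      simp [this]
    · simp only [h1, if_false]
      by_cases h2 : p ≤ i ∧ i < p + (l + 1)
      · have : i = p := by omega
        subst this
        simp [h2, List.getElem?_set]
      · simp only [h2, if_false]
        rw [List.getElem?_set]
        have : ¬ p = i := by omega
        simp [this]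

theorem setRange_length (mask : List Bool) (p l : Nat) :
    (hmSetRange mask p l).length = mask.length := by
  unfold hmSetRange
  induction l generalizing p mask with
  | zero => simp [List.range']
  | succ l ih => rw [List.range'_succ, List.foldl_cons, ih]; simp

theorem maskFold_getElem? (M : List (Nat × Nat)) :
    ∀ (mask : List Bool) (i : Nat), i < mask.length →
    (M.foldl (fun mk q => hmSetRange mk q.1 (q.2 - q.1)) mask)[i]? =
      if covB M i then some true else mask[i]? := by
  induction M with
  | nil => intro mask i hi; simp [covB]
  | cons q M ih =>
    intro mask i hi
    rw [List.foldl_cons, ih _ _ (by rw [setRange_length]; exact hi), covB_cons]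
    unfold hmSetRange
    rw [setRange_getElem? (q.2 - q.1) q.1 mask i]
    by_cases hc : covB M i
    · simp [hc]
    · simp only [hc, if_false, Bool.or_false]
      by_cases hq : q.1 ≤ i ∧ i < q.1 + (q.2 - q.1)
      · have : (decide (q.1 ≤ i) && decide (i < q.2)) = true ∨ (q.2 < q.1) := by
          by_cases h2 : i < q.2
          · left; simp [hq.1, h2]
          · right; omega
        rcases this with h | h
        · rw [if_pos hq, if_pos hi, h]; simp
        · have : ¬ (q.1 ≤ i ∧ i < q.1 + (q.2 - q.1)) := by omega
          exact absurd hq this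
      · have : (decide (q.1 ≤ i) && decide (i < q.2)) = false := by
          by_cases h1 : q.1 ≤ i
          · simp [h1]; omega
          · simp [h1]
        simp [hq, this]

theorem maskFold_length (M : List (Nat × Nat)) : ∀ (mask : List Bool),
    (M.foldl (fun mk q => hmSetRange mk q.1 (q.2 - q.1)) mask).length = mask.length := by
  induction M with
  | nil => intro mask; simp
  | cons q M ih => intro mask; rw [List.foldl_cons, ih, setRange_length]


theorem hmMatches_eq_flatMap (sl : List Char) (terms : List (List Char)) :
    hmMatches sl terms = terms.flatMap
      (fun term => (hmOcc sl (PySem.Chars.lower term) 0 (sl.length + 2)).map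
        (fun p => (p, p + term.length))) := by
  unfold hmMatches
  rw [PySem.List.foldl_append_eq_flatMap]
  simp

theorem maskFold_eq (sl : List Char) (terms : List (List Char)) (mask0 : List Bool) :
    terms.foldl
      (fun mk term =>
        (hmOcc sl (PySem.Chars.lower term) 0 (sl.length + 2)).foldl
          (fun mk2 p => hmSetRange mk2 p term.length) mk)
      mask0 =
    (hmMatches sl terms).foldl (fun mk q => hmSetRange mk q.1 (q.2 - q.1)) mask0 := by
  rw [hmMatches_eq_flatMap, List.foldl_flatMap]
  apply PySem.List.foldl_congr_mem
  intro acc term hterm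
  rw [List.foldl_map]
  apply PySem.List.foldl_congr_mem
  intro mk p hp
  simp

-- sorted2 fst-monotone
def hmLexLt (a b : Nat × Nat) : Bool :=
  decide (a.1 < b.1) || (!decide (b.1 < a.1) && decide (a.2 < b.2))

theorem hmLexLt_eq (a b : Nat × Nat) :
    hmLexLt a b = decide (a.1 < b.1 ∨ (¬ b.1 < a.1 ∧ a.2 < b.2)) := by
  by_cases h1 : a.1 < b.1 <;> by_cases h2 : b.1 < a.1 <;> by_cases h3 : a.2 < b.2 <;> simp [hmLexLt, h1, h2, h3]

theorem lexlt_asymm {x y : Nat × Nat} (h : hmLexLt x y = true) : hmLexLt y x = false := by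
  rw [hmLexLt_eq] at h ⊢
  rw [decide_eq_true_eq] at h
  rw [decide_eq_false_iff_not]
  omega

theorem lexlt_trans_neg {x y z : Nat × Nat} (h1 : hmLexLt x y = true) (h2 : hmLexLt z y = false) :
    hmLexLt z x = false := by
  rw [hmLexLt_eq] at h1 h2 ⊢
  rw [decide_eq_true_eq] at h1
  rw [decide_eq_false_iff_not] at h2 ⊢
  omega

theorem lexlt_false_fst {a b : Nat × Nat} (h : hmLexLt b a = false) : a.1 ≤ b.1 := by
  rw [hmLexLt_eq] at h
  rw [decide_eq_false_iff_not] at h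
  omega

theorem sorted2_eq_foldl (M : List (Nat × Nat)) :
    PySem.List.sorted2 M Prod.fst Prod.snd =
      M.foldl (fun acc x => PySem.List.insertBy hmLexLt x acc) [] := rfl

theorem insertBy_pairwise (x : Nat × Nat) : ∀ (ys : List (Nat × Nat)),
    ys.Pairwise (fun a b => hmLexLt b a = false) →
    (PySem.List.insertBy hmLexLt x ys).Pairwise (fun a b => hmLexLt b a = false) := by
  intro ys
  induction ys with
  | nil => intro _; simp [PySem.List.insertBy]
  | cons y ys ih =>
    intro hp
    rw [List.pairwise_cons] at hp
    obtain ⟨hy, hys⟩ := hp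
    unfold PySem.List.insertBy
    by_cases hxy : hmLexLt x y
    · simp only [hxy, if_true]
      refine List.pairwise_cons.mpr ⟨?_, List.pairwise_cons.mpr ⟨hy, hys⟩⟩
      intro z hz
      rcases List.mem_cons.mp hz with rfl | hz'
      · exact lexlt_asymm hxy
      · exact lexlt_trans_neg hxy (hy z hz')
    · simp only [hxy, if_false]
      refine List.pairwise_cons.mpr ⟨?_, ih hys⟩
      intro z hz
      rcases (PySem.List.mem_insertBy (before := hmLexLt) (x := x) (ys := ys) (y := z)).mp hz with rfl | hz'
      · simpa using hxy
      · exact hy z hz'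

theorem sorted2_fst_mono (M : List (Nat × Nat)) :
    (PySem.List.sorted2 M Prod.fst Prod.snd).Pairwise (fun a b => a.1 ≤ b.1) := by
  rw [sorted2_eq_foldl]
  have main : ∀ (L : List (Nat × Nat)) (acc : List (Nat × Nat)),
      acc.Pairwise (fun a b => hmLexLt b a = false) →
      (L.foldl (fun acc x => PySem.List.insertBy hmLexLt x acc) acc).Pairwise
        (fun a b => hmLexLt b a = false) := by
    intro L
    induction L with
    | nil => intro acc h; simpa using h
    | cons x L ih => intro acc h; exact ih _ (insertBy_pairwise x acc h)
  refine (main M [] (by simp)).imp ?_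
  intro a b hab
  exact lexlt_false_fst hab


theorem hmMerge_main (n : Nat) :
    ∀ (L accRev : List (Nat × Nat)),
      (∀ p ∈ L, p.1 < p.2 ∧ p.2 ≤ n) →
      L.Pairwise (fun a b => a.1 ≤ b.1) →
      (∀ p ∈ accRev, p.1 < p.2 ∧ p.2 ≤ n) →
      accRev.IsChain (fun a b => b.2 < a.1) →
      (∀ q ∈ accRev, ∀ p ∈ L, q.1 ≤ p.1) →
      (∀ p ∈ hmMerge accRev L, p.1 < p.2 ∧ p.2 ≤ n) ∧
        (hmMerge accRev L).IsChain (fun a b => a.2 < b.1) ∧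
        (∀ i, covB (hmMerge accRev L) i = covB (accRev ++ L) i) := by
  intro L
  induction L with
  | nil =>
    intro accRev _ _ hacc hchain _
    refine ⟨?_, ?_, ?_⟩
    · intro p hp; exact hacc p (by simpa [hmMerge] using hp)
    · simp only [hmMerge]
      rw [List.isChain_reverse]
      exact hchain
    · intro i; simp [hmMerge, covB_reverse, covB_append, covB]
  | cons q L ih =>
    rcases q with ⟨s, e⟩
    intro accRev hL hsorted hacc hchain hI1
    rw [List.pairwise_cons] at hsorted
    obtain ⟨hfirst, hsorted'⟩ := hsorted
    have hLmem : ∀ p ∈ L, p.1 < p.2 ∧ p.2 ≤ n := fun p hp => hL p (List.mem_cons_of_mem _ hp)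
    have hse : s < e ∧ e ≤ n := hL (s, e) List.mem_cons_self
    match accRev with
    | [] =>
      simp only [hmMerge]
      have h := ih [(s, e)] hLmem hsorted'
        (by intro p hp; simp at hp; subst hp; exact hse)
        (by simp)
        (by intro qq hqq p hp; simp at hqq; subst hqq; exact hfirst p hp)
      refine ⟨h.1, h.2.1, ?_⟩
      intro i
      rw [h.2.2 i]
      simp [covB_append, covB_cons]
    | (ls, le) :: tl =>
      have hlsle : ls < le ∧ le ≤ n := hacc (ls, le) List.mem_cons_self
      have hlss : ls ≤ s := hI1 (ls, le) List.mem_cons_self (s, e) List.mem_cons_self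
      by_cases hcase : s ≤ le
      · simp only [hmMerge, hcase, if_true]
        have hmemacc : ∀ p ∈ (ls, max le e) :: tl, p.1 < p.2 ∧ p.2 ≤ n := by
          intro p hp
          rcases List.mem_cons.mp hp with rfl | hp'
          · constructor
            · simp; omega
            · simp; omega
          · exact hacc p (List.mem_cons_of_mem _ hp')
        have hchain' : ((ls, max le e) :: tl).IsChain (fun a b => b.2 < a.1) := by
          cases tl with
          | nil => simp
          | cons t tl' =>
            rw [List.isChain_cons_cons] at hchain ⊢
            exact ⟨hchain.1, hchain.2⟩
        have hI1' : ∀ qq ∈ (ls, max le e) :: tl, ∀ p ∈ L, qq.1 ≤ p.1 := by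
          intro qq hqq p hp
          rcases List.mem_cons.mp hqq with rfl | hqq'
          · exact le_trans hlss (hfirst p hp)
          · exact hI1 qq (List.mem_cons_of_mem _ hqq') p (List.mem_cons_of_mem _ hp)
        have h := ih ((ls, max le e) :: tl) hLmem hsorted' hmemacc hchain' hI1'
        refine ⟨h.1, h.2.1, ?_⟩
        intro i
        rw [h.2.2 i]
        simp only [covB_append, covB_cons]
        have : ((decide (ls ≤ i) && decide (i < max le e)) : Bool)
            = ((decide (ls ≤ i) && decide (i < le)) || (decide (s ≤ i) && decide (i < e))) := by
          by_cases h1 : ls ≤ i <;> by_cases h2 : i < le <;> by_cases h3 : s ≤ i <;>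
            by_cases h4 : i < e <;> simp [h1, h2, h3, h4] <;> omega
        rw [this]
        cases covB tl i <;> cases covB L i <;> simp <;>
          cases (decide (ls ≤ i) && decide (i < le)) <;>
          cases (decide (s ≤ i) && decide (i < e)) <;> simp
      · simp only [hmMerge, hcase, if_false]
        have hmemacc : ∀ p ∈ (s, e) :: (ls, le) :: tl, p.1 < p.2 ∧ p.2 ≤ n := by
          intro p hp
          rcases List.mem_cons.mp hp with rfl | hp'
          · exact hse
          · exact hacc p hp'
        have hchain' : ((s, e) :: (ls, le) :: tl).IsChain (fun a b => b.2 < a.1) := by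
          rw [List.isChain_cons_cons]
          exact ⟨by omega, hchain⟩
        have hI1' : ∀ qq ∈ (s, e) :: (ls, le) :: tl, ∀ p ∈ L, qq.1 ≤ p.1 := by
          intro qq hqq p hp
          rcases List.mem_cons.mp hqq with rfl | hqq'
          · exact hfirst p hp
          · exact hI1 qq hqq' p (List.mem_cons_of_mem _ hp)
        have h := ih ((s, e) :: (ls, le) :: tl) hLmem hsorted' hmemacc hchain' hI1'
        refine ⟨h.1, h.2.1, ?_⟩
        intro i
        rw [h.2.2 i]
        simp only [covB_append, covB_cons]
        cases covB tl i <;> cases covB L i <;>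
          cases (decide (ls ≤ i) && decide (i < le)) <;>
          cases (decide (s ≤ i) && decide (i < e)) <;> simp


theorem chunks_cons (c : Char) (b : Bool) (rest : List (Char × Bool)) :
    chunks ((c, b) :: rest) =
      (match chunks rest with
       | (b', run) :: more => if b' = b then (b, c :: run) :: more else (b, [c]) :: (b', run) :: more
       | [] => [(b, [c])]) := rfl

theorem tagged_map_fst (cov : Nat → Bool) : ∀ (i : Nat) (l : List Char),
    (tagged cov i l).map Prod.fst = l := by
  intro i l
  induction l generalizing i with
  | nil => simp [tagged]
  | cons c rest ih => simp [tagged, ih]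

theorem tagged_append (cov : Nat → Bool) : ∀ (l₁ l₂ : List Char) (i : Nat),
    tagged cov i (l₁ ++ l₂) = tagged cov i l₁ ++ tagged cov (i + l₁.length) l₂ := by
  intro l₁
  induction l₁ with
  | nil => simp [tagged]
  | cons c rest ih =>
    intro l₂ i
    simp only [List.cons_append, tagged, ih, List.length_cons]
    have : i + 1 + rest.length = i + (rest.length + 1) := by omega
    rw [this]

theorem tagged_flag (cov : Nat → Bool) : ∀ (l : List Char) (i : Nat),
    ∀ x ∈ tagged cov i l, ∃ k, i ≤ k ∧ k < i + l.length ∧ x.2 = cov k := by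
  intro l
  induction l with
  | nil => intro i x hx; simp [tagged] at hx
  | cons c rest ih =>
    intro i x hx
    simp only [tagged, List.mem_cons] at hx
    rcases hx with rfl | hx'
    · exact ⟨i, le_refl _, by simp, rfl⟩
    · obtain ⟨k, h1, h2, h3⟩ := ih (i+1) x hx'
      exact ⟨k, by omega, by simp; omega, h3⟩

theorem chunks_of_const (b : Bool) : ∀ (l : List (Char × Bool)), l ≠ [] →
    (∀ x ∈ l, x.2 = b) → chunks l = [(b, l.map Prod.fst)] := by
  intro l
  induction l with
  | nil => intro h; exact absurd rfl h
  | cons x rest ih =>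
    intro _ hall
    rcases x with ⟨c, f⟩
    have hf : f = b := hall (c, f) List.mem_cons_self
    subst hf
    cases rest with
    | nil => simp [chunks]
    | cons y rest' =>
      have hrest := ih (by simp) (fun x hx => hall x (List.mem_cons_of_mem _ hx))
      rw [chunks_cons, hrest]
      simp

theorem chunks_cons_head (c : Char) (f : Bool) (rest : List (Char × Bool)) :
    ∃ run more, chunks ((c, f) :: rest) = (f, run) :: more := by
  rw [chunks_cons]
  rcases h : chunks rest with _ | ⟨⟨b', run⟩, more⟩
  · exact ⟨[c], [], rfl⟩
  · by_cases hb : b' = f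
    · subst hb; simp only [if_pos rfl]; exact ⟨c :: run, more, rfl⟩
    · simp only [if_neg hb]; exact ⟨[c], (b', run) :: more, rfl⟩

theorem chunks_const_append (b : Bool) : ∀ (l₁ l₂ : List (Char × Bool)), l₁ ≠ [] →
    (∀ x ∈ l₁, x.2 = b) →
    (∀ y ∈ l₂.head?, y.2 ≠ b) →
    chunks (l₁ ++ l₂) = (b, l₁.map Prod.fst) :: chunks l₂ := by
  intro l₁
  induction l₁ with
  | nil => intro l₂ h; exact absurd rfl h
  | cons x rest ih =>
    intro l₂ _ hall hhd
    rcases x with ⟨c, f⟩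
    have hf : f = b := hall (c, f) List.mem_cons_self
    subst hf
    cases rest with
    | nil =>
      simp only [List.nil_append, List.cons_append, List.map_cons, List.map_nil]
      cases l₂ with
      | nil => simp [chunks]
      | cons y l₂' =>
        rcases y with ⟨cy, fy⟩
        have hfy : fy ≠ f := by
          have := hhd (cy, fy) (by simp)
          simpa using this
        obtain ⟨run, more, heq⟩ := chunks_cons_head cy fy l₂'
        rw [chunks_cons, heq]; dsimp only; rw [if_neg hfy, ← heq]
    | cons z rest' =>
      have hrec := ih l₂ (by simp) (fun x hx => hall x (List.mem_cons_of_mem _ hx)) hhd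
      simp only [List.cons_append] at hrec ⊢
      rw [chunks_cons, hrec]
      have hz : z.2 = f := hall z (List.mem_cons_of_mem _ List.mem_cons_self)
      simp [hz]


theorem chain_rest {s e : Nat} {rest : List (Nat × Nat)}
    (hne : ∀ p ∈ rest, p.1 < p.2)
    (hch : List.IsChain (fun a b => a.2 < b.1) ((s, e) :: rest)) :
    ∀ p ∈ rest, e < p.1 := by
  induction rest generalizing s e with
  | nil => intro p hp; simp at hp
  | cons q rest ih =>
    intro p hp
    rw [List.isChain_cons_cons] at hch
    rcases List.mem_cons.mp hp with rfl | hp'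
    · exact hch.1
    · have hq : q.1 < q.2 := hne q List.mem_cons_self
      have := ih (fun r hr => hne r (List.mem_cons_of_mem _ hr)) hch.2 p hp'
      omega

theorem hmBuild_eq (cs : List Char) (base hi : String) :
    ∀ (R : List (Nat × Nat)) (pos : Nat) (cov : Nat → Bool),
      (∀ p ∈ R, p.1 < p.2 ∧ p.2 ≤ cs.length) →
      R.IsChain (fun a b => a.2 < b.1) →
      (∀ p ∈ R, pos ≤ p.1) →
      (∀ i, pos ≤ i → cov i = covB R i) →
      hmBuild cs base hi pos R = render base hi (chunks (tagged cov pos (cs.drop pos))) := by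
  intro R
  induction R with
  | nil =>
    intro pos cov _ _ _ hcov
    by_cases hlt : pos < cs.length
    · have hne : cs.drop pos ≠ [] := by
        intro h
        rw [List.drop_eq_nil_iff] at h
        omega
      have htag : tagged cov pos (cs.drop pos) ≠ [] := by
        cases h : cs.drop pos with
        | nil => exact absurd h hne
        | cons c l => simp [tagged, h]
      rw [chunks_of_const false _ htag ?flags]
      case flags =>
        intro x hx
        obtain ⟨k, h1, h2, h3⟩ := tagged_flag cov (cs.drop pos) pos x hx
        rw [h3, hcov k h1, covB_nil]
      rw [tagged_map_fst]
      simp only [hmBuild, hlt, if_true, render, List.map_cons, List.map_nil]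
      simp only [PySem.Chars.slice, PySem.List.slice_from_natCast]
      simp
    · have hnil : cs.drop pos = [] := List.drop_eq_nil_of_le (by omega)
      simp [hmBuild, hlt, hnil, tagged, chunks, render]
  | cons q rest ih =>
    rcases q with ⟨s, e⟩
    intro pos cov hmem hchain hpos hcov
    have hse : s < e ∧ e ≤ cs.length := hmem (s, e) List.mem_cons_self
    have hps : pos ≤ s := hpos (s, e) List.mem_cons_self
    have hrest_gt : ∀ p ∈ rest, e < p.1 :=
      chain_rest (fun p hp => (hmem p (List.mem_cons_of_mem _ hp)).1) hchain
    have hdecomp : cs.drop pos =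
        ((cs.drop pos).take (s - pos)) ++ (((cs.drop s).take (e - s)) ++ cs.drop e) := by
      have e12 : cs.drop pos = (cs.drop pos).take (s - pos) ++ cs.drop s := by
        conv_lhs => rw [← List.take_append_drop (s - pos) (cs.drop pos)]
        rw [List.drop_drop]
        have hx : pos + (s - pos) = s := by omega
        rw [hx]
      have e34 : cs.drop s = (cs.drop s).take (e - s) ++ cs.drop e := by
        conv_lhs => rw [← List.take_append_drop (e - s) (cs.drop s)]
        rw [List.drop_drop]
        have hx : s + (e - s) = e := by omega
        rw [hx]
      calc cs.drop pos = (cs.drop pos).take (s - pos) ++ cs.drop s := e12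
        _ = (cs.drop pos).take (s - pos) ++ ((cs.drop s).take (e - s) ++ cs.drop e) :=
          congrArg ((cs.drop pos).take (s - pos) ++ ·) e34
    have hlen1 : ((cs.drop pos).take (s - pos)).length = s - pos := by
      simp [List.length_take, List.length_drop]; omega
    have hlen2 : ((cs.drop s).take (e - s)).length = e - s := by
      simp [List.length_take, List.length_drop]; omega
    have hcov_low : ∀ k, pos ≤ k → k < s → cov k = false := by
      intro k h1 h2
      rw [hcov k h1, covB_cons]
      have hrb : covB rest k = false := by
        simp only [covB, List.any_eq_false]
        intro p hp
        have := hrest_gt p hp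
        simp <;> omega
      rw [hrb]
      simp <;> omega
    have hcov_mid : ∀ k, s ≤ k → k < e → cov k = true := by
      intro k h1 h2
      rw [hcov k (by omega), covB_cons]
      simp [h1, h2]
    have hcov_e : cov e = false := by
      rw [hcov e (by omega), covB_cons]
      have hrb : covB rest e = false := by
        simp only [covB, List.any_eq_false]
        intro p hp
        have := hrest_gt p hp
        simp <;> omega
      rw [hrb]
      simp <;> omega
    rw [hdecomp, tagged_append, tagged_append]
    rw [hlen1, hlen2]
    have hpos1 : pos + (s - pos) = s := by omega
    have hpos2 : s + (e - s) = e := by omega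
    rw [hpos1, hpos2]
    set B1 := tagged cov pos ((cs.drop pos).take (s - pos)) with hB1
    set B2 := tagged cov s ((cs.drop s).take (e - s)) with hB2
    set T := tagged cov e (cs.drop e) with hT
    have hB2ne : B2 ≠ [] := by
      rw [hB2]
      cases h : (cs.drop s).take (e - s) with
      | nil =>
        exfalso
        have hl := congrArg List.length h
        rw [hlen2] at hl
        simp at hl
        omega
      | cons c l => simp [tagged]
    have hB2flags : ∀ x ∈ B2, x.2 = true := by
      intro x hx
      obtain ⟨k, h1, h2, h3⟩ := tagged_flag cov _ s x hx
      rw [hlen2] at h2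
      rw [h3]
      exact hcov_mid k h1 (by omega)
    have hThead : ∀ y ∈ T.head?, y.2 ≠ true := by
      intro y hy
      rw [hT] at hy
      cases h : cs.drop e with
      | nil => rw [h] at hy; simp [tagged] at hy
      | cons c l =>
        rw [h] at hy
        simp [tagged] at hy
        subst hy
        simp [hcov_e]
    have hmid : chunks (B2 ++ T) = (true, B2.map Prod.fst) :: chunks T :=
      chunks_const_append true B2 T hB2ne hB2flags hThead
    have hIH : hmBuild cs base hi e rest = render base hi (chunks T) := by
      apply ih e cov
      · intro p hp; exact hmem p (List.mem_cons_of_mem _ hp)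
      · cases rest with
        | nil => simp
        | cons r rest' => exact (List.isChain_cons_cons.mp hchain).2
      · intro p hp; exact le_of_lt (hrest_gt p hp)
      · intro i hi2
        rw [hcov i (by omega), covB_cons]
        have hfa : (decide (s ≤ i) && decide (i < e)) = false := by simp <;> omega
        rw [hfa, Bool.false_or]
    by_cases hlt : pos < s
    · have hB1ne : B1 ≠ [] := by
        rw [hB1]
        cases h : (cs.drop pos).take (s - pos) with
        | nil =>
          exfalso
          have hl := congrArg List.length h
          rw [hlen1] at hl
          simp at hl
          omega
        | cons c l => simp [tagged]
      have hB1flags : ∀ x ∈ B1, x.2 = false := by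
        intro x hx
        obtain ⟨k, h1, h2, h3⟩ := tagged_flag cov _ pos x hx
        rw [hlen1] at h2
        rw [h3]
        exact hcov_low k h1 (by omega)
      have hB2head : ∀ y ∈ (B2 ++ T).head?, y.2 ≠ false := by
        intro y hy
        cases hb2 : B2 with
        | nil => exact absurd hb2 hB2ne
        | cons x B2' =>
          rw [hb2] at hy
          simp at hy
          subst hy
          have hxf := hB2flags x (by rw [hb2]; exact List.mem_cons_self)
          simp [hxf]
      have hall : chunks (B1 ++ (B2 ++ T)) = (false, B1.map Prod.fst) :: chunks (B2 ++ T) :=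
        chunks_const_append false B1 (B2 ++ T) hB1ne hB1flags hB2head
      rw [hall, hmid]
      simp only [hmBuild, hlt, if_true, PySem.Chars.slice, PySem.List.slice_natCast]
      rw [hIH]
      simp [render, hB1, hB2, tagged_map_fst]
    · have hz : s - pos = 0 := by omega
      have hB1nil : B1 = [] := by
        rw [hB1, hz]
        simp [tagged]
      rw [hB1nil, List.nil_append, hmid]
      simp only [hmBuild, hlt, if_false, List.nil_append, PySem.Chars.slice, PySem.List.slice_natCast]
      rw [hIH]
      simp [render, hB2, tagged_map_fst]


theorem hmGroup_eq (base hi : String) : ∀ (l : List (Char × Bool)) (cur : Bool) (txt : List Char),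
    hmGroup base hi cur txt l =
      (match chunks l with
       | [] => [((if cur then hi else base), String.ofList txt)]
       | (b, run) :: more =>
         if b = cur then ((if cur then hi else base), String.ofList (txt ++ run)) :: render base hi more
         else ((if cur then hi else base), String.ofList txt) :: render base hi ((b, run) :: more)) := by
  intro l
  induction l with
  | nil => intro cur txt; rfl
  | cons x rest ih =>
    rcases x with ⟨ch, f⟩
    intro cur txt
    rw [chunks_cons]
    show (if f = cur then hmGroup base hi cur (txt ++ [ch]) rest
      else ((if cur then hi else base), String.ofList txt) :: hmGroup base hi f [ch] rest) = _
    rw [ih, ih]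
    rcases h : chunks rest with _ | ⟨⟨b', run⟩, more⟩ <;> dsimp only <;>
      split_ifs <;> simp_all [render]

theorem zip_eq_tagged (cov : Nat → Bool) : ∀ (cs : List Char) (mask : List Bool) (i : Nat),
    mask.length = cs.length →
    (∀ k, (hk : k < mask.length) → mask[k] = cov (i + k)) →
    cs.zip mask = tagged cov i cs := by
  intro cs
  induction cs with
  | nil => intro mask i hlen _; rw [List.length_nil, List.length_eq_zero_iff] at hlen; subst hlen; rfl
  | cons c cs ih =>
    intro mask i hlen hval
    cases mask with
    | nil => simp at hlen
    | cons m mask' =>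
      have h0 : m = cov i := by
        have := hval 0 (by simp)
        simpa using this
      rw [List.zip_cons_cons]
      simp only [tagged]
      rw [h0]
      congr 1
      apply ih mask' (i+1)
      · simpa using hlen
      · intro k hk
        have := hval (k+1) (by simpa using Nat.succ_lt_succ hk)
        simpa [Nat.add_assoc, Nat.add_comm 1 k] using this


theorem hmMatches_good (sl : List Char) (terms : List (List Char))
    (hterms : ∀ w ∈ terms, w ≠ []) :
    ∀ q ∈ hmMatches sl terms, q.1 < q.2 ∧ q.2 ≤ sl.length := by
  rw [hmMatches_eq_flatMap]
  intro q hq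
  rw [List.mem_flatMap] at hq
  obtain ⟨term, hterm, hq'⟩ := hq
  rw [List.mem_map] at hq'
  obtain ⟨p, hp, rfl⟩ := hq'
  have hlow : PySem.Chars.lower term ≠ [] := by
    intro h
    apply hterms term hterm
    simpa [PySem.Chars.lower] using h
  have hb := hmOcc_bound sl (PySem.Chars.lower term) hlow _ p hp
  have hl : (PySem.Chars.lower term).length = term.length := by simp [PySem.Chars.lower]
  have htl : term.length ≠ 0 := by
    intro h
    exact hterms term hterm (List.length_eq_zero_iff.mp h)
  constructor
  · simp; omega
  · simp; omega

theorem hmMask_eq (sl : List Char) (terms : List (List Char)) (n : Nat) :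
    hmMask sl terms n =
      (hmMatches sl terms).foldl (fun mk q => hmSetRange mk q.1 (q.2 - q.1)) (List.replicate n false) :=
  maskFold_eq sl terms (List.replicate n false)

-- ===== VERDICT (by name: the statement is the Claim_ definition above) =====
theorem highlight_matches_spec : Claim_equal_highlight_matches := by
  unfold Claim_equal_highlight_matches Spec_highlight_matches
  intro step pattern is_selected _
  by_cases hpat : pattern = ""
  · simp [highlight_matches, highlight_matches_alt, hpat]
  · simp only [highlight_matches, highlight_matches_alt, hpat, if_false]
    set cs := step.toList with hcs
    set sl := PySem.Chars.lower cs with hsl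
    set terms := PySem.Chars.split₀ pattern.toList with hterms_def
    set base := (if is_selected then "class:step.selected" else "class:step") with hbase
    set hi := (if is_selected then "class:step.selected.highlight" else "class:step.highlight") with hhi
    have hlensl : sl.length = cs.length := by rw [hsl]; simp [PySem.Chars.lower]
    set M := hmMatches sl terms with hMdef
    have hgood : ∀ q ∈ M, q.1 < q.2 ∧ q.2 ≤ cs.length := by
      intro q hq
      have := hmMatches_good sl terms (split₀_ne_nil _) q hq
      omega
    rw [hmMask_eq]
    set mask := M.foldl (fun mk q => hmSetRange mk q.1 (q.2 - q.1)) (List.replicate cs.length false) with hmask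
    have hmlen : mask.length = cs.length := by rw [hmask, maskFold_length]; simp
    have hget : ∀ i, i < cs.length → mask[i]? = some (covB M i) := by
      intro i hi2
      rw [hmask, maskFold_getElem? M _ i (by simp; exact hi2)]
      rw [List.getElem?_replicate]
      cases covB M i
      · simp [hi2]
      · simp
    by_cases hM : M = []
    · have hctr : mask.contains true = false := by
        rw [hmask, hM]
        simp [List.mem_replicate]
      rw [if_pos hM, hctr]
      simp
    · rw [if_neg hM]
      obtain ⟨q0, hq0⟩ := List.exists_mem_of_ne_nil M hM
      have hq0g := hgood q0 hq0
      have hcov0 : covB M q0.1 = true := by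
        simp only [covB, List.any_eq_true]
        exact ⟨q0, hq0, by simp; omega⟩
      have hq1lt : q0.1 < cs.length := Nat.lt_of_lt_of_le hq0g.1 hq0g.2
      have htrue : true ∈ mask := by
        have hg := hget q0.1 hq1lt
        rw [hcov0] at hg
        exact List.mem_of_getElem? hg
      have hcontains : mask.contains true = true := by
        simpa [List.contains_iff_mem] using htrue
      rw [hcontains]
      simp only [Bool.not_true, Bool.false_eq_true, if_false]
      have hn1 : 0 < cs.length := Nat.lt_of_le_of_lt (Nat.zero_le _) hq1lt
      -- A side
      set S := PySem.List.sorted2 M Prod.fst Prod.snd with hS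
      have hperm : S.Perm M := PySem.List.sorted2_perm M _ _ _
      have hgoodS : ∀ q ∈ S, q.1 < q.2 ∧ q.2 ≤ cs.length := by
        intro q hq
        exact hgood q (hperm.mem_iff.mp hq)
      have hmm := hmMerge_main cs.length S [] hgoodS (by rw [hS]; exact sorted2_fst_mono M)
        (by simp) (by simp) (by simp)
      set R := hmMerge [] S with hR
      have hcovR : ∀ i, covB R i = covB M i := by
        intro i
        rw [hmm.2.2 i]
        simp only [List.nil_append]
        exact covB_perm hperm i
      have hA := hmBuild_eq cs base hi R 0 (fun i => covB M i)
        hmm.1 hmm.2.1 (fun p _ => Nat.zero_le _) (fun i _ => (hcovR i).symm)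
      rw [hA, List.drop_zero]
      -- B side
      have hzip : cs.zip mask = tagged (fun i => covB M i) 0 cs := by
        apply zip_eq_tagged _ cs mask 0 hmlen
        intro k hk
        have hg := hget k (hmlen ▸ hk)
        rw [List.getElem?_eq_getElem hk] at hg
        simpa using hg
      have hhead : mask.headD false = covB M 0 := by
        rw [List.headD_eq_head?, List.head?_eq_getElem?, hget 0 hn1]
        rfl
      rw [hzip, hhead]
      cases hcsc : cs with
      | nil => rw [hcsc] at hn1; simp at hn1
      | cons c cs' =>
        have htag : tagged (fun i => covB M i) 0 (c :: cs') =
            (c, covB M 0) :: tagged (fun i => covB M i) 1 cs' := rfl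
        rw [htag]
        obtain ⟨run, more, hch⟩ := chunks_cons_head c (covB M 0) (tagged (fun i => covB M i) 1 cs')
        rw [hmGroup_eq, hch]
        dsimp only
        rw [if_pos rfl]
        simp [render]
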